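-- pv_equiv track=rewrite | github.com/ryo909/ai-dev-exp-control | scripts/promote_youtube_handoff.py | choose_video_url
-- ===== SOURCE A (Python) =====
-- def is_placeholder_url(value):
--     s = str(value or "").strip()
--     return bool(s) and ("REPLACE_" in s or "PLACEHOLDER" in s)
--
-- def choose_video_url(candidates):
--     chosen_value = ""
--     chosen_source = ""
--     for src, value in candidates:
--         val = str(value or "").strip()
--         if not val:
--             continue
--         if not chosen_value:
--             chosen_value = val
--             chosen_source = src
--             continue
--         if is_placeholder_url(chosen_value) and not is_placeholder_url(val):
--             chosen_value = val
--             chosen_source = src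
--     return chosen_value, chosen_source
-- ===== SOURCE B (Python) =====
-- def _is_placeholder(value):
--     s = str(value or "").strip()
--     return bool(s) and ("REPLACE_" in s or "PLACEHOLDER" in s)
--
-- def choose_video_url(candidates):
--     filtered = [(src, str(value or "").strip()) for src, value in candidates]
--     filtered = [(src, val) for src, val in filtered if val]
--     for src, val in filtered:
--         if not _is_placeholder(val):
--             return val, src
--     if filtered:
--         return filtered[0][1], filtered[0][0]
--     return "", ""
-- ===== Notes on version B (the rewrite author's own statement) =====
-- stated objective: simpler
-- what changed: Replaces A's carry-and-conditionally-upgrade state machine with an explicit filter of stripped non-empty candidates followed by a first-match scan for a non-placeholder value, falling back to the first filtered pair.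
import Mathlib
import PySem

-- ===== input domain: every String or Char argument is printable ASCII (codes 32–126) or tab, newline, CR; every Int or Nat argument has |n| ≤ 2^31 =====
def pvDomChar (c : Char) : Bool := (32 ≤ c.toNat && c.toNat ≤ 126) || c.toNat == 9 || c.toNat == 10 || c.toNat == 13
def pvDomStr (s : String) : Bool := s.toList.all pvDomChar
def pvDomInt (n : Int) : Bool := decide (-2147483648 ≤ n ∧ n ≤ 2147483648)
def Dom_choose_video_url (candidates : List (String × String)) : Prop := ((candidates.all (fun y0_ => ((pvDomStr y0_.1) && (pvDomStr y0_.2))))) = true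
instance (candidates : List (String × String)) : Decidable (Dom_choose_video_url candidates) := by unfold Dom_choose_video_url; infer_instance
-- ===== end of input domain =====

-- B replaces A's carry-and-conditionally-upgrade loop state machine with an explicit
-- filter of stripped non-empty candidates plus a first-match scan (objective: simpler).

-- ===== PORT A =====
def is_placeholder_url (value : String) : Bool :=
  let s := PySem.Str.strip (if value == "" then "" else value)
  !(s == "") && (PySem.Str.isIn "REPLACE_" s || PySem.Str.isIn "PLACEHOLDER" s)

def choose_video_url (candidates : List (String × String)) : String × String :=
  candidates.foldl
    (fun st p =>
      let val := PySem.Str.strip (if p.2 == "" then "" else p.2)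
      if val == "" then st
      else if st.1 == "" then (val, p.1)
      else if is_placeholder_url st.1 && !is_placeholder_url val then (val, p.1)
      else st)
    ("", "")

-- ===== PORT B =====
def pv_is_placeholder (value : String) : Bool :=
  let s := PySem.Str.strip (if value == "" then "" else value)
  !(s == "") && (PySem.Str.isIn "REPLACE_" s || PySem.Str.isIn "PLACEHOLDER" s)

def choose_video_url_alt (candidates : List (String × String)) : String × String :=
  let filtered :=
    (candidates.map (fun p => (p.1, PySem.Str.strip (if p.2 == "" then "" else p.2)))).filter
      (fun p => !(p.2 == ""))
  match filtered.find? (fun p => !pv_is_placeholder p.2) with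
  | some (src, val) => (val, src)
  | none =>
    match filtered with
    | (src, val) :: _ => (val, src)
    | [] => ("", "")

-- ===== PRECONDITION & SPEC =====
def Spec_choose_video_url (candidates : List (String × String)) (out : String × String) : Prop := out = choose_video_url_alt candidates
instance (candidates : List (String × String)) (out : String × String) : Decidable (Spec_choose_video_url candidates out) := by unfold Spec_choose_video_url; infer_instance

-- ===== CLAIM (what is proved, stated in full; the proofs are below) =====
def Claim_equal_choose_video_url : Prop := ∀ (candidates : List (String × String)), Dom_choose_video_url candidates → Spec_choose_video_url candidates (choose_video_url candidates)

-- ===== LEMMAS AND PROOFS =====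

-- A's loop body, named for the proofs
def pvStepA (st p : String × String) : String × String :=
  let val := PySem.Str.strip (if p.2 == "" then "" else p.2)
  if val == "" then st
  else if st.1 == "" then (val, p.1)
  else if is_placeholder_url st.1 && !is_placeholder_url val then (val, p.1)
  else st

-- A's loop body restricted to pairs whose value is already stripped and non-empty
def pvStep2 (st p : String × String) : String × String :=
  if st.1 == "" then (p.2, p.1)
  else if is_placeholder_url st.1 && !is_placeholder_url p.2 then (p.2, p.1)
  else st

-- B's filtered list
def pvF (cs : List (String × String)) : List (String × String) :=
  (cs.map (fun p => (p.1, PySem.Str.strip (if p.2 == "" then "" else p.2)))).filter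
    (fun p => !(p.2 == ""))

-- B's selection on the filtered list
def pvSelect (L : List (String × String)) : String × String :=
  match L.find? (fun p => !is_placeholder_url p.2) with
  | some p => (p.2, p.1)
  | none =>
    match L with
    | q :: _ => (q.2, q.1)
    | [] => ("", "")

theorem pvF_mem {cs : List (String × String)} {p : String × String} (h : p ∈ pvF cs) :
    p.2 ≠ "" := by
  have := List.of_mem_filter h
  simpa using this

theorem foldA_eq (cs : List (String × String)) :
    ∀ st, cs.foldl pvStepA st = (pvF cs).foldl pvStep2 st := by
  induction cs with
  | nil => intro st; rfl
  | cons p cs ih =>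
    intro st
    by_cases h : PySem.Str.strip (if p.2 = "" then "" else p.2) = ""
    · have hF : pvF (p :: cs) = pvF cs := by
        simp [pvF, h]
      have hstep : pvStepA st p = st := by
        simp [pvStepA, h]
      rw [List.foldl_cons, hstep, hF, ih]
    · have hF : pvF (p :: cs) =
          (p.1, PySem.Str.strip (if p.2 = "" then "" else p.2)) :: pvF cs := by
        simp [pvF, h]
      have hstep : pvStepA st p =
          pvStep2 st (p.1, PySem.Str.strip (if p.2 = "" then "" else p.2)) := by
        simp [pvStepA, pvStep2, h]
      rw [List.foldl_cons, hstep, hF, List.foldl_cons, ih]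

theorem fold2_nonph (L : List (String × String)) :
    ∀ st : String × String, st.1 ≠ "" → is_placeholder_url st.1 = false →
      L.foldl pvStep2 st = st := by
  induction L with
  | nil => intro st _ _; rfl
  | cons p L ih =>
    intro st h1 h2
    have hstep : pvStep2 st p = st := by simp [pvStep2, h1, h2]
    rw [List.foldl_cons, hstep, ih st h1 h2]

theorem fold2_ph (L : List (String × String)) (hL : ∀ p ∈ L, p.2 ≠ "") :
    ∀ st : String × String, st.1 ≠ "" → is_placeholder_url st.1 = true →
      L.foldl pvStep2 st =
        (match L.find? (fun p => !is_placeholder_url p.2) with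
         | some p => (p.2, p.1)
         | none => st) := by
  induction L with
  | nil => intro st _ _; rfl
  | cons p L ih =>
    intro st h1 h2
    by_cases hph : is_placeholder_url p.2 = true
    · have hstep : pvStep2 st p = st := by simp [pvStep2, h1, h2, hph]
      have hrec := ih (fun q hq => hL q (List.mem_cons_of_mem _ hq)) st h1 h2
      rw [List.foldl_cons, hstep, hrec]
      simp [List.find?, hph]
    · have hph' : is_placeholder_url p.2 = false := by simpa using hph
      have hstep : pvStep2 st p = (p.2, p.1) := by simp [pvStep2, h1, h2, hph']
      have hp2 : p.2 ≠ "" := hL p (List.mem_cons_self ..)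
      have hrec := fold2_nonph L (p.2, p.1) hp2 hph'
      rw [List.foldl_cons, hstep, hrec]
      simp [List.find?, hph']

theorem fold2_main (L : List (String × String)) (hL : ∀ p ∈ L, p.2 ≠ "") :
    L.foldl pvStep2 ("", "") = pvSelect L := by
  cases L with
  | nil => rfl
  | cons p L =>
    have hp2 : p.2 ≠ "" := hL p (List.mem_cons_self ..)
    have hstep : pvStep2 ("", "") p = (p.2, p.1) := by simp [pvStep2]
    by_cases hph : is_placeholder_url p.2 = true
    · have hrec := fold2_ph L (fun q hq => hL q (List.mem_cons_of_mem _ hq)) (p.2, p.1) hp2 hph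
      rw [List.foldl_cons, hstep, hrec]
      simp [pvSelect, List.find?, hph]
    · have hph' : is_placeholder_url p.2 = false := by simpa using hph
      have hrec := fold2_nonph L (p.2, p.1) hp2 hph'
      rw [List.foldl_cons, hstep, hrec]
      simp [pvSelect, List.find?, hph']

theorem pv_is_placeholder_eq : pv_is_placeholder = is_placeholder_url := rfl

theorem alt_eq_select (cs : List (String × String)) :
    choose_video_url_alt cs = pvSelect (pvF cs) := by
  show (match (pvF cs).find? (fun p => !pv_is_placeholder p.2) with
        | some (src, val) => (val, src)
        | none =>
          match pvF cs with
          | (src, val) :: _ => (val, src)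
          | [] => ("", "")) = pvSelect (pvF cs)
  rw [pv_is_placeholder_eq]
  generalize pvF cs = L
  rcases hfind : L.find? (fun p => !is_placeholder_url p.2) with _ | ⟨src, val⟩
  · rcases L with _ | ⟨⟨s, v⟩, rest⟩ <;> simp [pvSelect, hfind]
  · simp [pvSelect, hfind]

theorem choose_eq (cs : List (String × String)) :
    choose_video_url cs = choose_video_url_alt cs := by
  have h1 : choose_video_url cs = (pvF cs).foldl pvStep2 ("", "") := foldA_eq cs ("", "")
  have h2 := fold2_main (pvF cs) (fun p hp => pvF_mem hp)
  rw [h1, h2, alt_eq_select]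

-- ===== VERDICT (by name: the statement is the Claim_ definition above) =====
theorem choose_video_url_spec : Claim_equal_choose_video_url := by
  intro cs _
  unfold Spec_choose_video_url
  exact choose_eq cs
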